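-- pv_equiv track=rewrite | github.com/eh329/Udacity-AI-Programming-with-Python-Nanodegree | Use a Pre-trained Image Classifier to Identify Dog Breeds/final_results.py | short_reads
-- ===== SOURCE A (Python) =====
-- def short_reads(reads):
--     final = {}
--
--     for key, value in reads.items():
--         no = False
--         res = []
--
--         for line in value:
--             if "*** Results Summary for" in line:
--                 no = True
--
--             if no:
--                 res.append(line)
--
--         final[key] = res
--
--     return final
-- ===== SOURCE B (Python) =====
-- def short_reads(reads):
--     marker = "*** Results Summary for"
--     return {key: value[next((i for i, line in enumerate(value) if marker in line), len(value)):]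
--             for key, value in reads.items()}
-- ===== Notes on version B (the rewrite author's own statement) =====
-- stated objective: simpler
-- what changed: Replaces the flag-plus-conditional-append inner loop with locate-the-first-marker-line-then-slice: a single dict comprehension that finds the index of the first line containing the marker (defaulting to len(value)) and keeps value[idx:].
import Mathlib
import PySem

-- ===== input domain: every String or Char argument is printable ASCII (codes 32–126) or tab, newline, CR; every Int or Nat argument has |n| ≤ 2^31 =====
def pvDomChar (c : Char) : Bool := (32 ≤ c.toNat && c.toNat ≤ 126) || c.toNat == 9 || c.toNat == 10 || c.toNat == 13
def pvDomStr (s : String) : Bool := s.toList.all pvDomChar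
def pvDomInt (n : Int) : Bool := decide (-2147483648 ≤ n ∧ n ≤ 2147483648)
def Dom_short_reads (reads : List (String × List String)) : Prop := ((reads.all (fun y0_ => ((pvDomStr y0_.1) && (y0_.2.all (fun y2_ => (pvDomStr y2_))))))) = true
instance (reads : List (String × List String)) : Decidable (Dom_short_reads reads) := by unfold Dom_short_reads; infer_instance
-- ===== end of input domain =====

-- B replaces A's flag-plus-conditional-append inner loop with locate-first-marker-line-then-slice (objective: simpler).

-- ===== PORT A =====
-- the body of A's inner 'for line in value' loop (state = (no, res))
def pvStepA (st : Bool × List String) (line : String) : Bool × List String :=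
  let no := if PySem.Str.isIn "*** Results Summary for" line then true else st.1
  if no then (no, st.2 ++ [line]) else (no, st.2)

def short_reads (reads : List (String × List String)) : List (String × List String) :=
  (reads.foldl (fun (final : PySem.Dict String (List String)) kv =>
      final.insert kv.1 ((kv.2.foldl pvStepA (false, ([] : List String))).2))
    PySem.Dict.empty).items

-- ===== PORT B =====
def short_reads_alt (reads : List (String × List String)) : List (String × List String) :=
  (reads.foldl (fun (final : PySem.Dict String (List String)) kv =>
      final.insert kv.1
        (kv.2.drop (kv.2.findIdx (fun line => PySem.Str.isIn "*** Results Summary for" line))))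
    PySem.Dict.empty).items

-- ===== PRECONDITION & SPEC =====
def Spec_short_reads (reads : List (String × List String)) (out : List (String × List String)) : Prop := out = short_reads_alt reads
instance (reads : List (String × List String)) (out : List (String × List String)) : Decidable (Spec_short_reads reads out) := by unfold Spec_short_reads; infer_instance

-- ===== CLAIM (what is proved, stated in full; the proofs are below) =====
def Claim_equal_short_reads : Prop := ∀ (reads : List (String × List String)), Dom_short_reads reads → Spec_short_reads reads (short_reads reads)

-- ===== LEMMAS AND PROOFS =====

theorem pvStepA_eq (b : Bool) (res : List String) (line : String) :
    pvStepA (b, res) line =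
      if PySem.Str.isIn "*** Results Summary for" line || b then (true, res ++ [line])
      else (false, res) := by
  cases hb : PySem.Str.isIn "*** Results Summary for" line <;>
    simp only [pvStepA, hb] <;> cases b <;> rfl

theorem pv_foldA_true (v res : List String) :
    v.foldl pvStepA (true, res) = (true, res ++ v) := by
  induction v generalizing res with
  | nil => simp
  | cons h t ih =>
    rw [List.foldl_cons, pvStepA_eq, Bool.or_true, if_pos rfl, ih]
    simp

theorem pv_foldA_false (v res : List String) :
    (v.foldl pvStepA (false, res)).2
      = res ++ v.drop (v.findIdx (fun line => PySem.Str.isIn "*** Results Summary for" line)) := by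
  induction v generalizing res with
  | nil => simp
  | cons h t ih =>
    rw [List.foldl_cons, pvStepA_eq, Bool.or_false]
    cases hb : PySem.Str.isIn "*** Results Summary for" h
    · rw [if_neg (by decide), ih]
      simp only [List.findIdx_cons, hb, cond_false, List.drop_succ_cons]
    · rw [if_pos rfl, pv_foldA_true]
      simp only [List.findIdx_cons, hb, cond_true, List.drop_zero]
      simp

-- ===== VERDICT (by name: the statement is the Claim_ definition above) =====
theorem short_reads_spec : Claim_equal_short_reads := by
  intro reads _
  unfold Spec_short_reads short_reads short_reads_alt
  have hf : (fun (final : PySem.Dict String (List String)) (kv : String × List String) =>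
        final.insert kv.1 ((kv.2.foldl pvStepA (false, ([] : List String))).2))
      = (fun (final : PySem.Dict String (List String)) kv =>
        final.insert kv.1
          (kv.2.drop (kv.2.findIdx (fun line => PySem.Str.isIn "*** Results Summary for" line)))) := by
    funext final kv
    rw [pv_foldA_false]
    simp
  rw [hf]
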